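-- pv_equiv track=rewrite | github.com/jenniezheng/BS_Poker_Chances_Calculator | prob.py | top_straight
-- ===== SOURCE A (Python) =====
-- def top_straight(hand,length):
--     if(length>13):
--         return False
--
--     arr=[False]*13
--     for card in hand:
--         _,card_num,_=card
--         if(card_num!=0):
--             arr[card_num]=True
--
--     low_index=0
--     max_length=0
--     current_length=0
--     #try start at ace
--     for x in range(12,12+length):
--         if(arr[x%13]):
--             current_length+=1
--             if(max_length<=current_length):
--                 max_length=current_length
--
--
--     for x in range(length-1,13):
--         if(arr[x-length]):
--             current_length-=1
--         if(arr[x]):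
--             current_length+=1
--             if(max_length<=current_length):
--                 max_length=current_length
--                 low_index=x-length+1
--     if(low_index==0 and length!=13):
--         low_index+=1
--     return low_index
-- ===== SOURCE B (Python) =====
-- def top_straight(hand, length):
--     # A straight longer than the 13 ranks is impossible.
--     if length > 13:
--         return False
--
--     # Presence bitmap over ranks 0..12 (rank 0 means "no card"; Python's negative
--     # indices in A correspond to taking the rank mod 13 here).
--     arr = [False] * 13
--     for _, num, _ in hand:
--         if num != 0:
--             arr[num % 13] = True
--
--     # Prefix sums over the wrap-extended array: every window count is an O(1) range query.
--     ext = arr + arr[:max(length - 1, 0)]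
--     pre = [0]
--     for v in ext:
--         pre.append(pre[-1] + (1 if v else 0))
--
--     def cnt(start):
--         return pre[start + length] - pre[start]
--
--     # Wrap-around window {12, 0, .., length-2}: can only raise the max, never the index.
--     max_len = cnt(12)
--     low_index = 0
--     # Non-wrapping candidate windows; '>=' makes the latest qualifying start win,
--     # and a window only qualifies when its top card is present.
--     for s in range(0, 14 - length):
--         if arr[(s + length - 1) % 13]:
--             c = cnt(s)
--             if c >= max_len:
--                 max_len = c
--                 low_index = s
--     if low_index == 0 and length != 13:
--         low_index = 1
--     return low_index
-- ===== Notes on version B (the rewrite author's own statement) =====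
-- stated objective: alternative
-- what changed: A slides an incremental running count across the 13 ranks (decrement the rank that leaves, increment the one that enters); B precomputes a prefix-sum table over the wrap-extended presence bitmap so every candidate window's card count is an O(1) range query, scanning the wrap window first and then each non-wrapping start position.
-- outside the precondition, e.g. on top_straight([], 14): A returns False, B returns False
import Mathlib
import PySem

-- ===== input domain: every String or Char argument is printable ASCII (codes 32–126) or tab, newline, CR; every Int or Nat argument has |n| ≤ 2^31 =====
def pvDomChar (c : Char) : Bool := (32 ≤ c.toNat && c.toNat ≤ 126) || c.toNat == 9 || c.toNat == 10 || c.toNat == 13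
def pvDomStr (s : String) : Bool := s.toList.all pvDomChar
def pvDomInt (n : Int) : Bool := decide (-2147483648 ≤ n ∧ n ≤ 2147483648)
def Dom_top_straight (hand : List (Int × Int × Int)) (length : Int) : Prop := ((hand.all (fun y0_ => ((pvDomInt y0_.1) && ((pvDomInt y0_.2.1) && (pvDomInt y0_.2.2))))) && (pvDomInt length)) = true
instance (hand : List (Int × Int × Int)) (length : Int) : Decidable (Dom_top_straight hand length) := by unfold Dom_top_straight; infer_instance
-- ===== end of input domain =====

-- B replaces A's incremental sliding count by a prefix-sum table over the wrap-extended
-- bitmap, so each candidate window's count is an O(1) range query (objective: alternative).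

-- ===== PORT A =====
def top_straight (hand : List (Int × Int × Int)) (length : Int) : Int :=
  if length > 13 then 0  -- Python `return False` (== 0)
  else
    let arr : List Bool := hand.foldl (fun arr card =>
      if card.2.1 ≠ 0 then PySem.List.pySetD arr card.2.1 true else arr)
      (List.replicate 13 false)
    let st1 : Int × Int := (PySem.List.pyRange 12 (12 + length) 1).foldl
      (fun st x =>
        if PySem.List.pyGetD arr (PySem.Int.mod x 13) false then
          (if st.1 ≤ st.2 + 1 then st.2 + 1 else st.1, st.2 + 1)
        else st) (0, 0)
    let st2 : Int × Int × Int := (PySem.List.pyRange (length - 1) 13 1).foldl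
      (fun st x =>
        let cur := if PySem.List.pyGetD arr (x - length) false then st.2.2 - 1 else st.2.2
        if PySem.List.pyGetD arr x false then
          (if st.2.1 ≤ cur + 1 then (x - length + 1, cur + 1, cur + 1)
           else (st.1, st.2.1, cur + 1))
        else (st.1, st.2.1, cur))
      (0, st1.1, st1.2)
    if st2.1 = 0 ∧ length ≠ 13 then st2.1 + 1 else st2.1

-- ===== PORT B =====
def top_straight_alt (hand : List (Int × Int × Int)) (length : Int) : Int :=
  if length > 13 then 0  -- Python `return False` (== 0): a straight longer than 13 ranks is impossible
  else
    let arr : List Bool := hand.foldl (fun arr card =>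
      if card.2.1 ≠ 0 then PySem.List.pySetD arr (PySem.Int.mod card.2.1 13) true else arr)
      (List.replicate 13 false)
    let ext := arr ++ PySem.List.slice arr none (some (max (length - 1) 0))
    let pre : List Int := ext.foldl
      (fun p v => p ++ [PySem.List.pyGetD p (-1) 0 + (if v then 1 else 0)]) [0]
    let cnt : Int → Int := fun s =>
      PySem.List.pyGetD pre (s + length) 0 - PySem.List.pyGetD pre s 0
    let st : Int × Int := (PySem.List.pyRange 0 (14 - length) 1).foldl
      (fun st s =>
        if PySem.List.pyGetD arr (PySem.Int.mod (s + length - 1) 13) false then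
          (if st.1 ≤ cnt s then (cnt s, s) else st)
        else st) (cnt 12, 0)
    if st.2 = 0 ∧ length ≠ 13 then 1 else st.2

-- ===== PRECONDITION & SPEC =====
-- Pre_ excludes: length > 13, where BOTH A and B `return False` — the same value, but a
-- bool, not a value of the declared int return type, so the typed claim cannot cover it;
-- negative length, where A raises IndexError (the second loop reads arr past index 12);
-- and ranks outside [-13, 12], where arr[card_num] raises IndexError (ranks in [-13, -1]
-- are kept: A returns via Python's negative-index wraparound and B matches it with `% 13`).
def Pre_top_straight (hand : List (Int × Int × Int)) (length : Int) : Prop :=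
  0 ≤ length ∧ length ≤ 13 ∧ ∀ c ∈ hand, -13 ≤ c.2.1 ∧ c.2.1 ≤ 12
instance (hand : List (Int × Int × Int)) (length : Int) : Decidable (Pre_top_straight hand length) := by unfold Pre_top_straight; infer_instance

def pvWitness_top_straight : (List (Int × Int × Int)) × Int := ([(0, 5, 1), (2, 6, 0), (1, 9, 3)], 3)

def Spec_top_straight (hand : List (Int × Int × Int)) (length : Int) (out : Int) : Prop := out = top_straight_alt hand length
instance (hand : List (Int × Int × Int)) (length : Int) (out : Int) : Decidable (Spec_top_straight hand length out) := by unfold Spec_top_straight; infer_instance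

-- ===== CLAIM (what is proved, stated in full; the proofs are below) =====
def Claim_equal_top_straight : Prop := ∀ (hand : List (Int × Int × Int)) (length : Int), Dom_top_straight hand length → Pre_top_straight hand length → Spec_top_straight hand length (top_straight hand length)

-- ===== LEMMAS AND PROOFS =====

def pvB2i (b : Bool) : Int := if b then 1 else 0
def pvC (arr : List Bool) (L s : Nat) : Int :=
  ((List.range L).map (fun j => pvB2i (arr.getD (s + j) false))).sum
def pvW (arr : List Bool) (L : Nat) : Int :=
  ((List.range L).map (fun j => pvB2i (arr.getD (if j = 0 then 12 else j - 1) false))).sum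

lemma pvWin_eq (arr : List Bool) (h13 : arr.length = 13) (L s : Nat) (hs : s + L ≤ 13) :
    ((arr ++ arr.take (L-1)).drop s).take L
    = (List.range L).map (fun j => arr.getD (s + j) false) := by
  apply List.ext_getElem
  · simp [h13]; omega
  · intro j h1 h2
    simp only [List.getElem_take, List.getElem_drop, List.getElem_map, List.getElem_range]
    have hj : j < L := by simpa using h2
    rw [List.getElem_append_left (by omega)]
    rw [List.getD_eq_getElem arr false (by omega)]

lemma pvWin12_eq (arr : List Bool) (h13 : arr.length = 13) (L : Nat) (hL : L ≤ 13) :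
    ((arr ++ arr.take (L-1)).drop 12).take L
    = (List.range L).map (fun j => arr.getD (if j = 0 then 12 else j - 1) false) := by
  apply List.ext_getElem
  · simp [h13]; omega
  · intro j h1 h2
    simp only [List.getElem_take, List.getElem_drop, List.getElem_map, List.getElem_range]
    have hj : j < L := by simpa using h2
    by_cases hz : j = 0
    · subst hz
      rw [List.getElem_append_left (by omega)]
      have he : (if (0:Nat) = 0 then (12:Nat) else 0 - 1) = 12 := rfl
      rw [he, List.getD_eq_getElem arr false (by omega)]
    · rw [List.getElem_append_right (by omega)]
      rw [List.getElem_take]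
      simp only [if_neg hz]
      rw [List.getD_eq_getElem arr false (by omega)]
      congr 1
      omega

lemma pvSum_sub (ext : List Bool) (s L : Nat) (_h : s + L ≤ ext.length) :
    ((ext.take (s + L)).map pvB2i).sum - ((ext.take s).map pvB2i).sum
    = (((ext.drop s).take L).map pvB2i).sum := by
  rw [List.take_add, List.map_append, List.sum_append]
  ring

lemma pvC_cons (arr : List Bool) (L s : Nat) :
    pvC arr (L+1) s = pvB2i (arr.getD s false) + pvC arr L (s+1) := by
  simp only [pvC, List.range_succ_eq_map, List.map_cons, List.sum_cons, List.map_map,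
    Nat.add_zero]
  congr 1
  refine congrArg List.sum (List.map_congr_left ?_)
  intro j _
  simp only [Function.comp_apply]
  congr 2
  omega

lemma pvC_snoc (arr : List Bool) (L s : Nat) :
    pvC arr (L+1) s = pvC arr L s + pvB2i (arr.getD (s + L) false) := by
  simp only [pvC, List.range_succ, List.map_append, List.sum_append, List.map_cons,
    List.map_nil, List.sum_cons, List.sum_nil]
  ring

lemma pvC_step (arr : List Bool) (L s : Nat) :
    pvC arr L (s+1) = pvC arr L s - pvB2i (arr.getD s false) + pvB2i (arr.getD (s + L) false) := by
  cases L with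
  | zero =>
    simp only [pvC, List.range_zero, List.map_nil, List.sum_nil, Nat.add_zero]
    ring
  | succ M =>
    have h1 := pvC_cons arr M s
    have h2 := pvC_snoc arr M (s+1)
    have he : s + 1 + M = s + (M + 1) := by omega
    rw [h2, he, h1]
    ring

lemma pvW_eq_C0 (arr : List Bool) (L : Nat) (hL1 : 1 ≤ L) :
    pvW arr L = pvC arr L 0 - pvB2i (arr.getD (L-1) false) + pvB2i (arr.getD 12 false) := by
  obtain ⟨M, rfl⟩ : ∃ M, L = M + 1 := ⟨L - 1, by omega⟩
  have hW : pvW arr (M+1) = pvB2i (arr.getD 12 false) + pvC arr M 0 := by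
    simp only [pvW, pvC, List.range_succ_eq_map, List.map_cons, List.sum_cons, List.map_map,
      if_pos rfl]
    congr 1
    refine congrArg List.sum (List.map_congr_left ?_)
    intro j _
    simp only [Function.comp_apply]
    rw [if_neg (Nat.succ_ne_zero j)]
    congr 2
    omega
  have hC : pvC arr (M+1) 0 = pvC arr M 0 + pvB2i (arr.getD M false) := by
    have := pvC_snoc arr M 0
    simpa using this
  rw [hW, hC]
  simp only [Nat.add_sub_cancel]
  ring
def pvScan (a : Int) : List Bool → List Int
  | [] => []
  | v :: t => (a + pvB2i v) :: pvScan (a + pvB2i v) t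

lemma pvArr_len : ∀ (hand : List (Int × Int × Int)) (arr : List Bool),
    (hand.foldl (fun arr card =>
      if card.2.1 ≠ 0 then PySem.List.pySetD arr card.2.1 true else arr) arr).length
    = arr.length := by
  intro hand
  induction hand with
  | nil => intro arr; rfl
  | cons c t ih =>
    intro arr
    simp only [List.foldl_cons, ih]
    split_ifs <;> simp [PySem.List.length_pySetD]

lemma pvLoop1 (p : Int → Bool) : ∀ (xs : List Int) (c : Int),
    xs.foldl (fun (st : Int × Int) x =>
      if p x then (if st.1 ≤ st.2 + 1 then st.2 + 1 else st.1, st.2 + 1) else st) (c, c)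
    = (c + (xs.map (fun x => pvB2i (p x))).sum, c + (xs.map (fun x => pvB2i (p x))).sum) := by
  intro xs
  induction xs with
  | nil => intro c; simp
  | cons x t ih =>
    intro c
    simp only [List.foldl_cons, List.map_cons, List.sum_cons]
    by_cases h : p x
    · simp only [h, if_true, if_pos (by omega : c ≤ c + 1)]
      rw [ih (c + 1)]
      simp [pvB2i, Prod.mk.injEq]
      ring
    · simp only [if_neg h]
      rw [ih c]
      simp [pvB2i, (Bool.not_eq_true _).mp h]

lemma pvScan_fold : ∀ (ext : List Bool) (p : List Int) (hp : p ≠ []),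
    ext.foldl (fun p v => p ++ [PySem.List.pyGetD p (-1) 0 + (if v then 1 else 0)]) p
    = p ++ pvScan (p.getLast hp) ext := by
  intro ext
  induction ext with
  | nil => intro p hp; simp [pvScan]
  | cons v t ih =>
    intro p hp
    simp only [List.foldl_cons]
    rw [ih (p ++ [PySem.List.pyGetD p (-1) 0 + (if v then 1 else 0)]) (by simp)]
    rw [PySem.List.pyGetD_neg_one p 0 hp]
    simp [pvScan, pvB2i, List.getLast_append]

lemma pvScan_getD : ∀ (ext : List Bool) (a : Int) (k : Nat), k < ext.length →
    (pvScan a ext).getD k 0 = a + ((ext.take (k+1)).map pvB2i).sum := by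
  intro ext
  induction ext with
  | nil => intro a k h; simp at h
  | cons v t ih =>
    intro a k h
    cases k with
    | zero => simp [pvScan]
    | succ j =>
      simp only [pvScan, List.getD_cons_succ, List.take_succ_cons, List.map_cons, List.sum_cons]
      rw [ih (a + pvB2i v) j (by simpa using h)]
      ring

def pvPre (ext : List Bool) : List Int :=
  ext.foldl (fun p v => p ++ [PySem.List.pyGetD p (-1) 0 + (if v then 1 else 0)]) [0]

lemma pvPre_getD (ext : List Bool) (k : Nat) (hk : k ≤ ext.length) :
    PySem.List.pyGetD (pvPre ext) (k : Int) 0 = ((ext.take k).map pvB2i).sum := by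
  unfold pvPre
  rw [pvScan_fold ext [0] (by simp)]
  rw [PySem.List.pyGetD_natCast]
  cases k with
  | zero => simp
  | succ j =>
    simp only [List.getLast_singleton, List.cons_append, List.nil_append, List.getD_cons_succ]
    rw [pvScan_getD ext 0 j (by omega)]
    ring

lemma pvModIf (i : Int) (h1 : -13 ≤ i) (h2 : i < 13) :
    PySem.Int.mod i 13 = if 0 ≤ i then i else i + 13 := by
  simp only [PySem.Int.mod, Int.fmod_eq_emod]
  norm_num
  split_ifs <;> omega

lemma pvGetD_mod (arr : List Bool) (h13 : arr.length = 13) (i : Int)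
    (h1 : -13 ≤ i) (h2 : i < 13) :
    PySem.List.pyGetD arr i false = PySem.List.pyGetD arr (PySem.Int.mod i 13) false := by
  rw [pvModIf i h1 h2]
  by_cases h : 0 ≤ i
  · simp [h]
  · have e : 13 - (-i).toNat = (i + 13).toNat := by omega
    simp only [if_neg h, PySem.List.pyGetD, PySem.List.pyGet?, PySem.List.pyIdx?, h13, e]
    split_ifs <;> first | rfl | omega

lemma pvSetD_mod (arr : List Bool) (h13 : arr.length = 13) (i : Int)
    (h1 : -13 ≤ i) (h2 : i < 13) (v : Bool) :
    PySem.List.pySetD arr i v = PySem.List.pySetD arr (PySem.Int.mod i 13) v := by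
  rw [pvModIf i h1 h2]
  by_cases h : 0 ≤ i
  · simp [h]
  · have e : 13 - (-i).toNat = (i + 13).toNat := by omega
    simp only [if_neg h, PySem.List.pySetD, PySem.List.pySet?, PySem.List.pyIdx?, h13, e]
    split_ifs <;> first | rfl | omega

lemma pvArr_eq : ∀ (hand : List (Int × Int × Int)) (arr : List Bool), arr.length = 13 →
    (∀ c ∈ hand, -13 ≤ c.2.1 ∧ c.2.1 ≤ 12) →
    hand.foldl (fun arr card =>
      if card.2.1 ≠ 0 then PySem.List.pySetD arr card.2.1 true else arr) arr
    = hand.foldl (fun arr card =>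
      if card.2.1 ≠ 0 then PySem.List.pySetD arr (PySem.Int.mod card.2.1 13) true else arr) arr := by
  intro hand
  induction hand with
  | nil => intro arr _ _; rfl
  | cons c t ih =>
    intro arr h13 hmem
    have hc := hmem c (by simp)
    simp only [List.foldl_cons]
    by_cases h : c.2.1 ≠ 0
    · simp only [if_pos h]
      rw [← pvSetD_mod arr h13 c.2.1 hc.1 (by omega) true]
      exact ih _ (by rw [PySem.List.length_pySetD]; exact h13)
        (fun d hd => hmem d (by simp [hd]))
    · simp only [if_neg h]
      exact ih arr h13 (fun d hd => hmem d (by simp [hd]))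

lemma pvSlice_take (arr : List Bool) (L : Nat) :
    PySem.List.slice arr none (some (max ((L:Int) - 1) 0)) = arr.take (L - 1) := by
  rw [PySem.List.slice_to arr (le_max_right _ _)]
  congr 1
  omega

lemma pvCNT (arr : List Bool) (h13 : arr.length = 13) (L s : Nat) (hs : s + L ≤ 13) :
    PySem.List.pyGetD (pvPre (arr ++ arr.take (L-1))) ((s:Int) + (L:Int)) 0
      - PySem.List.pyGetD (pvPre (arr ++ arr.take (L-1))) (s:Int) 0 = pvC arr L s := by
  have hcast : (s:Int) + (L:Int) = ((s + L : Nat) : Int) := by push_cast; ring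
  have hlen : s + L ≤ (arr ++ arr.take (L-1)).length := by
    simp [h13]; omega
  rw [hcast, pvPre_getD _ _ hlen, pvPre_getD _ s (by omega), pvSum_sub _ _ _ hlen,
    pvWin_eq arr h13 L s hs, List.map_map]
  simp [pvC, Function.comp_def]

lemma pvCNT12 (arr : List Bool) (h13 : arr.length = 13) (L : Nat) (hL : L ≤ 13) :
    PySem.List.pyGetD (pvPre (arr ++ arr.take (L-1))) ((12:Int) + (L:Int)) 0
      - PySem.List.pyGetD (pvPre (arr ++ arr.take (L-1))) 12 0 = pvW arr L := by
  have hcast : (12:Int) + (L:Int) = ((12 + L : Nat) : Int) := by push_cast; ring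
  have hcast2 : (12:Int) = ((12:Nat) : Int) := by norm_num
  have hlen : 12 + L ≤ (arr ++ arr.take (L-1)).length := by
    simp [h13]; omega
  rw [hcast, hcast2, pvPre_getD _ _ hlen, pvPre_getD _ 12 (by simp [h13]; omega),
    pvSum_sub _ _ _ hlen, pvWin12_eq arr h13 L hL, List.map_map]
  simp [pvW, Function.comp_def]

lemma pvMod12 (k : Nat) (hk : k < 13) :
    PySem.Int.mod (12 + (k:Int)) 13 = ((if k = 0 then 12 else k - 1 : Nat) : Int) := by
  simp only [PySem.Int.mod, Int.fmod_eq_emod]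
  norm_num
  split_ifs <;> omega

lemma pvLoop1_sum (arr : List Bool) (L : Nat) (hL : L ≤ 13) :
    ((PySem.List.pyRange 12 (12 + (L:Int)) 1).map
      (fun x => pvB2i (PySem.List.pyGetD arr (PySem.Int.mod x 13) false))).sum = pvW arr L := by
  rw [PySem.List.pyRange_one]
  have ht : ((12 + (L:Int)) - 12).toNat = L := by omega
  rw [ht, List.map_map]
  unfold pvW
  refine congrArg List.sum (List.map_congr_left ?_)
  intro k hk
  have hk' : k < 13 := by have := List.mem_range.mp hk; omega
  simp only [Function.comp_apply]
  rw [pvMod12 k hk', PySem.List.pyGetD_natCast]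

lemma pvGetNeg1 (arr : List Bool) (h13 : arr.length = 13) :
    PySem.List.pyGetD arr (-1) false = arr.getD 12 false := by
  have hne : arr ≠ [] := by intro h; rw [h] at h13; simp at h13
  rw [PySem.List.pyGetD_neg_one arr false hne, List.getLast_eq_getElem,
    List.getD_eq_getElem arr false (by omega)]
  congr 1
  omega

lemma pvGetIdx (arr : List Bool) (L k : Nat) (h1 : 1 ≤ L + k) :
    PySem.List.pyGetD arr ((L:Int) - 1 + (k:Int)) false = arr.getD (L + k - 1) false := by
  have : (L:Int) - 1 + (k:Int) = ((L + k - 1 : Nat) : Int) := by omega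
  rw [this, PySem.List.pyGetD_natCast]

lemma pvGuard (arr : List Bool) (h13 : arr.length = 13) (L k : Nat) (hL : L ≤ 13) (hk : k ≤ 13 - L) :
    PySem.List.pyGetD arr (PySem.Int.mod ((k:Int) + (L:Int) - 1) 13) false
    = PySem.List.pyGetD arr ((L:Int) - 1 + (k:Int)) false := by
  have h1 : (-13:Int) ≤ (L:Int) - 1 + (k:Int) := by omega
  have h2 : (L:Int) - 1 + (k:Int) < 13 := by omega
  rw [pvGetD_mod arr h13 _ h1 h2]
  congr 2
  ring

def pvFA (arr : List Bool) (l : Int) (st : Int × Int × Int) (x : Int) : Int × Int × Int :=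
  let cur := if PySem.List.pyGetD arr (x - l) false then st.2.2 - 1 else st.2.2
  if PySem.List.pyGetD arr x false then
    (if st.2.1 ≤ cur + 1 then (x - l + 1, cur + 1, cur + 1)
     else (st.1, st.2.1, cur + 1))
  else (st.1, st.2.1, cur)

def pvFB (arr : List Bool) (l : Int) (c : Int → Int) (st : Int × Int) (s : Int) : Int × Int :=
  if PySem.List.pyGetD arr (PySem.Int.mod (s + l - 1) 13) false then
    (if st.1 ≤ c s then (c s, s) else st) else st

def pvCur (arr : List Bool) (L n : Nat) : Int := if n = 0 then pvW arr L else pvC arr L (n-1)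

lemma pvKey (arr : List Bool) (h13 : arr.length = 13) (L m : Nat) (hL : L ≤ 13) (hm : m ≤ 13 - L) :
    (if PySem.List.pyGetD arr ((L:Int) - 1 + (m:Int) - (L:Int)) false
     then pvCur arr L m - 1 else pvCur arr L m)
    + pvB2i (PySem.List.pyGetD arr ((L:Int) - 1 + (m:Int)) false) = pvC arr L m := by
  cases m with
  | zero =>
    have hsub : (L:Int) - 1 + (0:Nat) - (L:Int) = -1 := by push_cast; ring
    rw [hsub, pvGetNeg1 arr h13]
    simp only [pvCur, reduceIte]
    by_cases hz : L = 0
    · subst hz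
      simp only [Nat.cast_zero, zero_sub, add_zero, neg_add_rev]
      rw [pvGetNeg1 arr h13]
      simp only [pvW, pvC, List.range_zero, List.map_nil, List.sum_nil]
      cases h : arr.getD 12 false <;> simp [pvB2i, h]
    · rw [pvGetIdx arr L 0 (by omega)]
      rw [pvW_eq_C0 arr L (by omega)]
      have : L + 0 - 1 = L - 1 := by omega
      rw [this]
      cases h1 : arr.getD 12 false <;> cases h2 : arr.getD (L-1) false <;>
        simp [pvB2i]
  | succ j =>
    have hsub : (L:Int) - 1 + ((j+1:Nat):Int) - (L:Int) = ((j:Nat):Int) := by push_cast; ring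
    rw [hsub, PySem.List.pyGetD_natCast]
    rw [pvGetIdx arr L (j+1) (by omega)]
    have he1 : L + (j + 1) - 1 = j + L := by omega
    rw [he1]
    simp only [pvCur, Nat.succ_ne_zero, if_neg, Nat.add_sub_cancel]
    have hstep := pvC_step arr L j
    rw [hstep]
    simp only [pvB2i]
    cases h1 : arr.getD j false <;> cases h2 : arr.getD (j + L) false <;>
      simp only [h1, h2, Bool.false_eq_true, if_false, if_true] <;> ring

lemma pvMainInd (arr : List Bool) (h13 : arr.length = 13) (L : Nat) (hL : L ≤ 13)
    (c : Int → Int) (hc : ∀ s : Nat, s + L ≤ 13 → c (s:Int) = pvC arr L s) :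
    ∀ n, n ≤ 14 - L →
    (List.range n).foldl (fun st (k : Nat) => pvFA arr (L:Int) st ((L:Int) - 1 + (k:Int))) (0, pvW arr L, pvW arr L)
    = (((List.range n).foldl (fun st (k : Nat) => pvFB arr (L:Int) c st (k:Int)) (pvW arr L, 0)).2,
       ((List.range n).foldl (fun st (k : Nat) => pvFB arr (L:Int) c st (k:Int)) (pvW arr L, 0)).1,
       pvCur arr L n) := by
  intro n
  induction n with
  | zero => intro _; simp [pvCur]
  | succ m ih =>
    intro hm
    rw [List.range_succ, List.foldl_append, List.foldl_append, ih (by omega),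
      List.foldl_cons, List.foldl_nil, List.foldl_cons, List.foldl_nil]
    set B := (List.range m).foldl (fun st (k : Nat) => pvFB arr (L:Int) c st (k:Int)) (pvW arr L, 0) with hB
    have hkey := pvKey arr h13 L m hL (by omega)
    have hguard := pvGuard arr h13 L m hL (by omega)
    have hcm := hc m (by omega)
    have hlow : (L:Int) - 1 + (m:Int) - (L:Int) + 1 = (m:Int) := by ring
    have hcur1 : pvCur arr L (m + 1) = pvC arr L m := by simp [pvCur]
    simp only [pvFA, pvFB]
    rw [hguard, hcm, hcur1]
    cases hG : PySem.List.pyGetD arr ((L:Int) - 1 + (m:Int)) false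
    · rw [hG] at hkey
      simp only [pvB2i, Bool.false_eq_true, if_false, add_zero] at hkey
      simp only [Bool.false_eq_true, if_false]
      rw [hkey]
    · rw [hG] at hkey
      simp only [pvB2i, if_true] at hkey
      simp only [reduceIte]
      rw [hkey, hlow]
      by_cases hle : B.1 ≤ pvC arr L m
      · simp only [if_pos hle]
      · simp only [if_neg hle]
theorem pvFinal : ∀ (hand : List (Int × Int × Int)) (length : Int),
    Pre_top_straight hand length → top_straight hand length = top_straight_alt hand length := by
  intro hand length hpre
  obtain ⟨hl0, hl13, hranks⟩ := hpre
  obtain ⟨L, rfl⟩ : ∃ L : Nat, length = (L : Int) := ⟨length.toNat, by omega⟩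
  have hL : L ≤ 13 := by omega
  rw [top_straight, top_straight_alt]
  rw [if_neg (by omega : ¬ ((L:Int) > 13)), if_neg (by omega : ¬ ((L:Int) > 13))]
  rw [← pvArr_eq hand (List.replicate 13 false) (by simp) hranks]
  set arr := hand.foldl (fun arr card =>
    if card.2.1 ≠ 0 then PySem.List.pySetD arr card.2.1 true else arr)
    (List.replicate 13 false) with harr
  have h13 : arr.length = 13 := by
    rw [harr, pvArr_len hand (List.replicate 13 false)]; simp
  dsimp only
  rw [pvLoop1 (fun x => PySem.List.pyGetD arr (PySem.Int.mod x 13) false)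
      (PySem.List.pyRange 12 (12 + (L:Int)) 1) 0]
  rw [pvLoop1_sum arr L hL]
  rw [pvSlice_take arr L]
  rw [PySem.List.pyRange_one ((L:Int) - 1) 13, PySem.List.pyRange_one 0 (14 - (L:Int))]
  rw [show ((13:Int) - ((L:Int) - 1)).toNat = 14 - L by omega]
  rw [show ((14:Int) - (L:Int) - 0).toNat = 14 - L by omega]
  rw [List.foldl_map, List.foldl_map]
  simp only [zero_add]
  show (if (List.foldl (fun st (k : Nat) => pvFA arr (L:Int) st ((L:Int) - 1 + (k:Int)))
            (0, pvW arr L, pvW arr L) (List.range (14 - L))).1 = 0 ∧ (L:Int) ≠ 13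
        then (List.foldl (fun st (k : Nat) => pvFA arr (L:Int) st ((L:Int) - 1 + (k:Int)))
            (0, pvW arr L, pvW arr L) (List.range (14 - L))).1 + 1
        else (List.foldl (fun st (k : Nat) => pvFA arr (L:Int) st ((L:Int) - 1 + (k:Int)))
            (0, pvW arr L, pvW arr L) (List.range (14 - L))).1)
      = (if (List.foldl (fun st (k : Nat) => pvFB arr (L:Int)
              (fun s => PySem.List.pyGetD (pvPre (arr ++ arr.take (L-1))) (s + (L:Int)) 0
                - PySem.List.pyGetD (pvPre (arr ++ arr.take (L-1))) s 0) st (k:Int))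
            (PySem.List.pyGetD (pvPre (arr ++ arr.take (L-1))) ((12:Int) + (L:Int)) 0
                - PySem.List.pyGetD (pvPre (arr ++ arr.take (L-1))) 12 0, 0) (List.range (14 - L))).2 = 0
            ∧ (L:Int) ≠ 13
        then 1
        else (List.foldl (fun st (k : Nat) => pvFB arr (L:Int)
              (fun s => PySem.List.pyGetD (pvPre (arr ++ arr.take (L-1))) (s + (L:Int)) 0
                - PySem.List.pyGetD (pvPre (arr ++ arr.take (L-1))) s 0) st (k:Int))
            (PySem.List.pyGetD (pvPre (arr ++ arr.take (L-1))) ((12:Int) + (L:Int)) 0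
                - PySem.List.pyGetD (pvPre (arr ++ arr.take (L-1))) 12 0, 0) (List.range (14 - L))).2)
  rw [pvCNT12 arr h13 L hL]
  rw [pvMainInd arr h13 L hL
      (fun s => PySem.List.pyGetD (pvPre (arr ++ arr.take (L-1))) (s + (L:Int)) 0
        - PySem.List.pyGetD (pvPre (arr ++ arr.take (L-1))) s 0)
      (pvCNT arr h13 L) (14 - L) le_rfl]
  split_ifs with h1
  · omega
  · rfl

-- ===== VERDICT (by name: the statement is the Claim_ definition above) =====
theorem top_straight_spec : Claim_equal_top_straight := by
  intro hand length _ hpre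
  unfold Spec_top_straight
  exact pvFinal hand length hpre
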